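-- pv_equiv track=rewrite | github.com/kolbytn/nethack-bandits | env.py | get_effects
-- ===== SOURCE A (Python) =====
-- def get_effects(monsters):
--     effects = dict()
--     for m in monsters:
--         for e in monsters[m]:
--             if "_RES" in e and e != "DISINT_RES":  # Only using resistance effects
--                 if e not in effects:
--                     effects[e] = dict()
--                 if monsters[m][e] > 0:
--                     effects[e][m] = monsters[m][e]
--     return effects
-- ===== SOURCE B (Python) =====
-- def get_effects(monsters):
--     keys = list(dict.fromkeys(
--         e for m in monsters for e in monsters[m]
--         if "_RES" in e and e != "DISINT_RES"))
--     return {e: {m: monsters[m][e] for m in monsters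
--                 if e in monsters[m] and monsters[m][e] > 0}
--             for e in keys}
-- ===== Notes on version B (the rewrite author's own statement) =====
-- stated objective: alternative
-- what changed: A builds the result in one combined pass, creating/updating inner dicts while walking each monster's effects; B first collects the ordered list of qualifying '_RES' effect names and then builds the result as a dict comprehension, populating each effect's inner dict by a per-key scan over the monsters.
import Mathlib
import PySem

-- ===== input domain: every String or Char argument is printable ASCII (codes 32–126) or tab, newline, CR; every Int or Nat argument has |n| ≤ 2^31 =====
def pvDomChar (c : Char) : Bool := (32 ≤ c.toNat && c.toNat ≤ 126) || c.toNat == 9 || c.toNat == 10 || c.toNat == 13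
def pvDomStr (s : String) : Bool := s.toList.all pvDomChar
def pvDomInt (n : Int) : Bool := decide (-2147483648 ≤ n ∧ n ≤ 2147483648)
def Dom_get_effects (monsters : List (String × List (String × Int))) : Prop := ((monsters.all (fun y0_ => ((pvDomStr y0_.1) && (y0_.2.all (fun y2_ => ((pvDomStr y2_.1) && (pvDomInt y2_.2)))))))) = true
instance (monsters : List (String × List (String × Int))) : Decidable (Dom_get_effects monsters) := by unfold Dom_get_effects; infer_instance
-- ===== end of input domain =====

-- B replaces A's single combined pass with a key-collection pass followed by a per-key
-- dict-comprehension population pass (objective: alternative decomposition, same cost).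

-- ===== PORT A =====
def pvQual (e : String) : Bool := PySem.Str.isIn "_RES" e && (e != "DISINT_RES")

def pvStep (m : String) (eff : PySem.Dict String (PySem.Dict String Int))
    (p : String × Int) : PySem.Dict String (PySem.Dict String Int) :=
  if pvQual p.1 then
    let eff1 := if eff.contains p.1 then eff else eff.insert p.1 PySem.Dict.empty
    if p.2 > 0 then eff1.insert p.1 ((eff1.getD p.1 PySem.Dict.empty).insert m p.2) else eff1
  else eff

def get_effects (monsters : List (String × List (String × Int))) : List (String × List (String × Int)) :=
  ((monsters.foldl (fun eff pm => pm.2.foldl (pvStep pm.1) eff) PySem.Dict.empty).items).map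
    (fun q => (q.1, q.2.items))

-- ===== PORT B =====
def pvKeysB (monsters : List (String × List (String × Int))) : List String :=
  PySem.List.dedup ((monsters.flatMap (fun pm => pm.2.map (·.1))).filter pvQual)

def pvInnerB (monsters : List (String × List (String × Int))) (e : String) : List (String × Int) :=
  monsters.filterMap (fun pm =>
    match pm.2.lookup e with
    | some v => if v > 0 then some (pm.1, v) else none
    | none => none)

def get_effects_alt (monsters : List (String × List (String × Int))) : List (String × List (String × Int)) :=
  (pvKeysB monsters).map (fun e => (e, pvInnerB monsters e))

-- ===== PRECONDITION & SPEC =====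
-- Pre_ excludes association lists with duplicate monster names or duplicate effect names
-- inside one monster: such lists do not represent any Python dict (A's parameter is a dict,
-- whose keys are necessarily distinct), so no claim is made about them.
def Pre_get_effects (monsters : List (String × List (String × Int))) : Prop :=
  (monsters.map (·.1)).Nodup ∧ ∀ pm ∈ monsters, (pm.2.map (·.1)).Nodup
instance (monsters : List (String × List (String × Int))) : Decidable (Pre_get_effects monsters) := by
  unfold Pre_get_effects; infer_instance

def pvWitness_get_effects : (List (String × List (String × Int))) :=
  [("orc", [("FIRE_RES", 1), ("DISINT_RES", 2), ("COLD_RES", 0)]), ("elf", [("FIRE_RES", -1)])]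

def Spec_get_effects (monsters : List (String × List (String × Int))) (out : List (String × List (String × Int))) : Prop := out = get_effects_alt monsters
instance (monsters : List (String × List (String × Int))) (out : List (String × List (String × Int))) : Decidable (Spec_get_effects monsters out) := by unfold Spec_get_effects; infer_instance

-- ===== CLAIM (what is proved, stated in full; the proofs are below) =====
def Claim_equal_get_effects : Prop := ∀ (monsters : List (String × List (String × Int))), Dom_get_effects monsters → Pre_get_effects monsters → Spec_get_effects monsters (get_effects monsters)

-- ===== LEMMAS AND PROOFS =====

-- helper definitions used only by the proofs
def pvUpdVal (l : List (String × Int)) (m e : String) (d : PySem.Dict String Int) : PySem.Dict String Int :=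
  match l.lookup e with
  | some v => if pvQual e && decide (v > 0) then d.insert m v else d
  | none => d

def pvNewVal (m : String) (p : String × Int) : PySem.Dict String Int :=
  if p.2 > 0 then PySem.Dict.mk [(m, p.2)] else PySem.Dict.empty

def pvTarget (monsters : List (String × List (String × Int))) : PySem.Dict String (PySem.Dict String Int) :=
  PySem.Dict.mk ((pvKeysB monsters).map (fun e => (e, PySem.Dict.mk (pvInnerB monsters e))))

theorem pv_lookup_eq_none {α β : Type} [BEq α] [LawfulBEq α] (l : List (α × β)) (a : α)
    (h : a ∉ l.map Prod.fst) : l.lookup a = none := by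
  induction l with
  | nil => rfl
  | cons p t ih =>
    simp only [List.map_cons, List.mem_cons, not_or] at h
    simp [List.lookup, beq_eq_false_iff_ne.mpr h.1, ih h.2]

theorem pv_lookup_eq_some {α β : Type} [BEq α] [LawfulBEq α] (l : List (α × β)) (a : α) (b : β)
    (hnd : (l.map Prod.fst).Nodup) (hmem : (a, b) ∈ l) : l.lookup a = some b := by
  induction l with
  | nil => simp at hmem
  | cons p t ih =>
    simp only [List.map_cons, List.nodup_cons] at hnd
    rcases List.mem_cons.mp hmem with h | h
    · subst h; simp [List.lookup]
    · have ha : a ∈ t.map Prod.fst := List.mem_map.mpr ⟨(a, b), h, rfl⟩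
      have hne : a ≠ p.1 := fun he => hnd.1 (he ▸ ha)
      simp [List.lookup, beq_eq_false_iff_ne.mpr hne, ih hnd.2 h]

theorem pv_mem_of_lookup {α β : Type} [BEq α] [LawfulBEq α] (l : List (α × β)) (a : α) (b : β)
    (h : l.lookup a = some b) : a ∈ l.map Prod.fst := by
  induction l with
  | nil => simp [List.lookup] at h
  | cons p t ih =>
    by_cases he : a == p.1
    · exact List.mem_map.mpr ⟨p, List.mem_cons_self, (eq_of_beq he).symm⟩
    · rw [List.lookup, Bool.eq_false_iff.mpr he] at h
      exact List.mem_cons_of_mem _ (ih h)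

theorem pv_ofList_nodup {α : Type} [DecidableEq α] (l : List α) (h : l.Nodup) :
    PySem.Set.ofList l = l := by
  have aux : ∀ (l : List α) (s : List α), l.Nodup → (∀ x ∈ l, x ∉ s) →
      PySem.Set.update s l = s ++ l := by
    intro l
    induction l with
    | nil => intro s _ _; simp [PySem.Set.update]
    | cons x t ih =>
      intro s hnd hdis
      simp only [List.nodup_cons] at hnd
      have hc : x ∉ s := hdis x List.mem_cons_self
      have : PySem.Set.update s (x :: t) = PySem.Set.update (s ++ [x]) t := by
        simp [PySem.Set.update, PySem.Set.add, PySem.Set.contains_eq_listContains, hc]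
      rw [this, ih (s ++ [x]) hnd.2]
      · simp
      · intro y hy
        simp only [List.mem_append, List.mem_singleton, not_or]
        exact ⟨fun hs => hdis y (List.mem_cons_of_mem _ hy) hs, fun he => hnd.1 (he ▸ hy)⟩
  have h1 : PySem.Set.ofList l = PySem.Set.update [] l := by
    simp [PySem.Set.ofList_eq_foldl, PySem.Set.update]
  rw [h1, aux l [] h (by simp)]; simp

theorem pvUpdVal_cons (p : String × Int) (t : List (String × Int)) (m e : String)
    (d : PySem.Dict String Int) (hnotin : p.1 ∉ t.map Prod.fst) :
    pvUpdVal (p :: t) m e d =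
      if e = p.1 then (if pvQual e && decide (p.2 > 0) then d.insert m p.2 else d)
      else pvUpdVal t m e d := by
  unfold pvUpdVal
  by_cases he : e = p.1
  · subst he
    rw [pv_lookup_eq_none t p.1 hnotin]
    simp [List.lookup]
  · simp [List.lookup, beq_eq_false_iff_ne.mpr he, he]

theorem pv_step_fold (m : String) (l : List (String × Int))
    (eff : PySem.Dict String (PySem.Dict String Int))
    (hnd : (l.map Prod.fst).Nodup) (hk : eff.keys.Nodup)
    (hm : ∀ e ∈ l.map Prod.fst, ∀ d, eff.get? e = some d → d.contains m = false) :
    (l.foldl (pvStep m) eff).items =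
      eff.items.map (fun q => (q.1, pvUpdVal l m q.1 q.2))
      ++ (l.filter (fun p => pvQual p.1 && !eff.contains p.1)).map (fun p => (p.1, pvNewVal m p)) := by
  induction l generalizing eff with
  | nil => simp [pvUpdVal, List.lookup]
  | cons p t ih =>
    rw [List.map_cons, List.nodup_cons] at hnd
    obtain ⟨hpt, hndt⟩ := hnd
    have hmt : ∀ e ∈ t.map Prod.fst, ∀ d, eff.get? e = some d → d.contains m = false :=
      fun e he => hm e (List.mem_cons_of_mem _ he)
    have hmke : ∀ q ∈ eff.items, q.1 ∈ eff.keys := by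
      intro q hqi; simp only [PySem.Dict.keys]; exact List.mem_map.mpr ⟨q, hqi, rfl⟩
    rw [List.foldl_cons]
    by_cases hq : pvQual p.1 = true
    · by_cases hc : eff.contains p.1 = true
      · -- key already present: p is dropped from the "new" part
        have hfilter : (p :: t).filter (fun p' => pvQual p'.1 && !eff.contains p'.1)
            = t.filter (fun p' => pvQual p'.1 && !eff.contains p'.1) := by
          simp [hc]
        by_cases hv : p.2 > 0
        · have hstep : pvStep m eff p = eff.insert p.1 ((eff.getD p.1 PySem.Dict.empty).insert m p.2) := by
            simp [pvStep, hq, hc, hv]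
          rw [hstep]
          have hk' : (eff.insert p.1 ((eff.getD p.1 PySem.Dict.empty).insert m p.2)).keys.Nodup :=
            PySem.Dict.nodup_keys_insert _ _ _ hk
          have hm' : ∀ e ∈ t.map Prod.fst, ∀ d,
              (eff.insert p.1 ((eff.getD p.1 PySem.Dict.empty).insert m p.2)).get? e = some d →
              d.contains m = false := by
            intro e he d hd
            have hne : e ≠ p.1 := fun h => hpt (h ▸ he)
            rw [PySem.Dict.get?_insert_of_ne _ _ hne] at hd
            exact hm e (List.mem_cons_of_mem _ he) d hd
          rw [ih _ hndt hk' hm']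
          rw [PySem.Dict.items_insert_of_contains _ _ hc, List.map_map]
          congr 1
          · apply List.map_congr_left
            intro q hqi
            simp only [Function.comp]
            rw [pvUpdVal_cons p t m q.1 q.2 hpt]
            by_cases he : q.1 = p.1
            · have hgd : eff.getD p.1 PySem.Dict.empty = q.2 :=
                PySem.Dict.getD_of_mem_items _ (by rw [← he]; exact hqi) hk _
              simp only [he, beq_self_eq_true, if_true, hgd]
              unfold pvUpdVal
              rw [pv_lookup_eq_none t p.1 hpt]
              simp [hq, hv]
            · simp [beq_eq_false_iff_ne.mpr he, he]
          · rw [hfilter]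
            congr 1
            apply List.filter_congr
            intro p' hp'
            have hne : p'.1 ≠ p.1 := fun h => hpt (h ▸ List.mem_map.mpr ⟨p', hp', rfl⟩)
            rw [PySem.Dict.contains_insert, beq_eq_false_iff_ne.mpr hne, Bool.false_or]
        · have hstep : pvStep m eff p = eff := by
            simp [pvStep, hq, hc, hv]
          rw [hstep, ih _ hndt hk hmt, hfilter]
          congr 1
          apply List.map_congr_left
          intro q hqi
          rw [pvUpdVal_cons p t m q.1 q.2 hpt]
          by_cases he : q.1 = p.1
          · have hln : t.lookup p.1 = none := pv_lookup_eq_none t p.1 hpt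
            simp [he, hv, pvUpdVal, hln]
          · simp [he]
      · -- new key: p.1 is appended
        have heff' : pvStep m eff p = eff.insert p.1 (pvNewVal m p) := by
          by_cases hv : p.2 > 0
          · have hcf : eff.contains p.1 = false := by simpa using hc
            have h1 : (eff.insert p.1 PySem.Dict.empty).getD p.1 PySem.Dict.empty = PySem.Dict.empty :=
              PySem.Dict.getD_insert_self _ _ _ _
            have h2 : (PySem.Dict.empty : PySem.Dict String Int).insert m p.2 = PySem.Dict.mk [(m, p.2)] := by
              apply PySem.Dict.ext
              rw [PySem.Dict.items_insert_of_not_contains _ _ (PySem.Dict.contains_empty _)]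
              simp [PySem.Dict.empty]
            simp [pvStep, hq, hcf, hv, h1, h2, PySem.Dict.insert_insert_self, pvNewVal]
          · simp [pvStep, hq, hc, hv, pvNewVal]
        rw [heff']
        have hnk : p.1 ∉ eff.keys := fun h => by
          rw [(PySem.Dict.contains_iff_mem_keys _ _).mpr h] at hc; exact hc rfl
        have hitems : (eff.insert p.1 (pvNewVal m p)).items = eff.items ++ [(p.1, pvNewVal m p)] :=
          PySem.Dict.items_insert_of_not_contains _ _ (by simpa using hc)
        have hk' : (eff.insert p.1 (pvNewVal m p)).keys.Nodup :=
          PySem.Dict.nodup_keys_insert _ _ _ hk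
        have hm' : ∀ e ∈ t.map Prod.fst, ∀ d,
            (eff.insert p.1 (pvNewVal m p)).get? e = some d → d.contains m = false := by
          intro e he d hd
          have hne : e ≠ p.1 := fun h => hpt (h ▸ he)
          rw [PySem.Dict.get?_insert_of_ne _ _ hne] at hd
          exact hm e (List.mem_cons_of_mem _ he) d hd
        rw [ih _ hndt hk' hm', hitems, List.map_append]
        have hnew : (fun q => (q.1, pvUpdVal t m q.1 q.2)) (p.1, pvNewVal m p) = (p.1, pvNewVal m p) := by
          simp only []
          unfold pvUpdVal
          rw [pv_lookup_eq_none t p.1 hpt]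
        have hfilter : (p :: t).filter (fun p' => pvQual p'.1 && !eff.contains p'.1)
            = p :: t.filter (fun p' => pvQual p'.1 && !eff.contains p'.1) := by
          simp [hq, hc]
        rw [hfilter]
        simp only [List.map_cons, List.map_nil, List.append_assoc, List.nil_append,
          List.cons_append, hnew]
        congr 1
        · apply List.map_congr_left
          intro q hqi
          rw [pvUpdVal_cons p t m q.1 q.2 hpt]
          have hne : q.1 ≠ p.1 := fun h => hnk (h ▸ hmke q hqi)
          simp [hne]
        · congr 1
          congr 1
          apply List.filter_congr
          intro p' hp'
          have hne : p'.1 ≠ p.1 := fun h => hpt (h ▸ List.mem_map.mpr ⟨p', hp', rfl⟩)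
          rw [PySem.Dict.contains_insert, beq_eq_false_iff_ne.mpr hne, Bool.false_or]
    · -- non-qualifying effect: no change at all
      have hstep : pvStep m eff p = eff := by simp [pvStep, hq]
      have hfilter : (p :: t).filter (fun p' => pvQual p'.1 && !eff.contains p'.1)
          = t.filter (fun p' => pvQual p'.1 && !eff.contains p'.1) := by
        simp [hq]
      rw [hstep, ih _ hndt hk hmt, hfilter]
      congr 1
      apply List.map_congr_left
      intro q hqi
      rw [pvUpdVal_cons p t m q.1 q.2 hpt]
      by_cases he : q.1 = p.1
      · have hln : t.lookup p.1 = none := pv_lookup_eq_none t p.1 hpt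
        simp [he, pvUpdVal, hln]
        exact fun h => absurd h hq
      · simp [he]

theorem pv_keysB_qual (monsters : List (String × List (String × Int))) (e : String)
    (h : e ∈ pvKeysB monsters) : pvQual e = true := by
  unfold pvKeysB at h
  rw [PySem.List.mem_dedup] at h
  exact (List.mem_filter.mp h).2

theorem pv_innerB_sub (monsters : List (String × List (String × Int))) (e : String) (x : String)
    (h : x ∈ (pvInnerB monsters e).map Prod.fst) : x ∈ monsters.map Prod.fst := by
  rcases List.mem_map.mp h with ⟨p, hp, hx⟩
  rcases List.mem_filterMap.mp hp with ⟨pm, hpm, hsome⟩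
  refine List.mem_map.mpr ⟨pm, hpm, ?_⟩
  rcases hl : pm.2.lookup e with _ | v <;> rw [hl] at hsome
  · simp at hsome
  · by_cases hv : v > 0
    · simp [hv] at hsome; rw [← hx, ← hsome]
    · simp [hv] at hsome

theorem pv_innerB_nil (monsters : List (String × List (String × Int))) (e : String)
    (hq : pvQual e = true) (h : e ∉ pvKeysB monsters) : pvInnerB monsters e = [] := by
  unfold pvKeysB at h
  rw [PySem.List.mem_dedup] at h
  unfold pvInnerB
  rw [List.filterMap_eq_nil_iff]
  intro pm hpm
  rcases hl : pm.2.lookup e with _ | v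
  · simp
  · exfalso
    apply h
    exact List.mem_filter.mpr ⟨List.mem_flatMap.mpr ⟨pm, hpm, pv_mem_of_lookup _ _ _ hl⟩, hq⟩

theorem pv_main (monsters : List (String × List (String × Int)))
    (hpre : Pre_get_effects monsters) :
    monsters.foldl (fun eff pm => pm.2.foldl (pvStep pm.1) eff) PySem.Dict.empty = pvTarget monsters := by
  induction monsters using List.reverseRecOn with
  | nil =>
    apply PySem.Dict.ext
    simp [pvTarget, pvKeysB, PySem.List.dedup, PySem.Dict.empty]
  | append_singleton ms pm ih =>
    obtain ⟨hnd, hinner⟩ := hpre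
    rw [List.map_append, List.nodup_append] at hnd
    obtain ⟨hndms, _, hdisj⟩ := hnd
    have hnotin : pm.1 ∉ ms.map Prod.fst := by
      intro h
      exact hdisj _ h pm.1 (by simp) rfl
    have hndpm : (pm.2.map Prod.fst).Nodup := hinner pm (by simp)
    have hpre' : Pre_get_effects ms :=
      ⟨hndms, fun q hq => hinner q (List.mem_append_left _ hq)⟩
    rw [List.foldl_append, List.foldl_cons, List.foldl_nil, ih hpre']
    -- facts about pvTarget ms
    have hkeysT : (pvTarget ms).keys = pvKeysB ms := by
      simp [pvTarget, PySem.Dict.keys, Function.comp_def]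
    have hkT : (pvTarget ms).keys.Nodup := by
      rw [hkeysT]; unfold pvKeysB; rw [PySem.List.dedup_eq_ofList]
      exact PySem.Set.nodup_ofList _
    have hct : ∀ x, (pvTarget ms).contains x = decide (x ∈ pvKeysB ms) := by
      intro x
      rw [PySem.Dict.contains_eq_decide_mem_keys, hkeysT]
    have hmT : ∀ e ∈ pm.2.map Prod.fst, ∀ d,
        (pvTarget ms).get? e = some d → d.contains pm.1 = false := by
      intro e _ d hd
      have hmemi : (e, d) ∈ (pvTarget ms).items := PySem.Dict.mem_items_of_get?_eq_some _ hd
      simp only [pvTarget] at hmemi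
      rcases List.mem_map.mp hmemi with ⟨e', _, heq⟩
      have hd' : d = PySem.Dict.mk (pvInnerB ms e') := by
        have := congrArg Prod.snd heq; simpa using this.symm
      subst hd'
      rw [PySem.Dict.contains_eq_decide_mem_keys]
      simp only [PySem.Dict.keys, decide_eq_false_iff_not]
      intro hmem
      exact hnotin (pv_innerB_sub ms e' pm.1 hmem)
    apply PySem.Dict.ext
    rw [pv_step_fold pm.1 pm.2 (pvTarget ms) hndpm hkT hmT]
    -- the new key list appended by pm
    have hqknd : ((pm.2.map Prod.fst).filter pvQual).Nodup := hndpm.filter _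
    have hkeys : pvKeysB (ms ++ [pm]) =
        pvKeysB ms ++ ((pm.2.map Prod.fst).filter pvQual).filter
          (fun e => !PySem.Set.contains (pvKeysB ms) e) := by
      have hOfApp : ∀ (a b : List String),
          PySem.Set.ofList (a ++ b) = PySem.Set.update (PySem.Set.ofList a) b := by
        intro a b
        rw [PySem.Set.ofList_eq_foldl, PySem.Set.ofList_eq_foldl, List.foldl_append,
          PySem.Set.update]
      have hflat : ((List.flatMap (fun pm => pm.2.map (·.1)) [pm]).filter pvQual)
          = (pm.2.map Prod.fst).filter pvQual := by simp
      unfold pvKeysB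
      rw [PySem.List.dedup_eq_ofList, PySem.List.dedup_eq_ofList]
      rw [List.flatMap_append, List.filter_append, hflat]
      rw [hOfApp, PySem.Set.update_eq_append_filter]
      rw [pv_ofList_nodup _ hqknd]
    -- value agreement on old keys
    have hold : ∀ e ∈ pvKeysB ms,
        pvUpdVal pm.2 pm.1 e (PySem.Dict.mk (pvInnerB ms e)) = PySem.Dict.mk (pvInnerB (ms ++ [pm]) e) := by
      intro e he
      have hqe : pvQual e = true := pv_keysB_qual ms e he
      have hinn : pvInnerB (ms ++ [pm]) e = pvInnerB ms e ++
          (match pm.2.lookup e with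
           | some v => if v > 0 then [(pm.1, v)] else []
           | none => []) := by
        unfold pvInnerB
        rw [List.filterMap_append]
        congr 1
        rcases hl : pm.2.lookup e with _ | v
        · simp [hl]
        · by_cases hv : v > 0 <;> simp [hl, hv]
      have hnc : (PySem.Dict.mk (pvInnerB ms e)).contains pm.1 = false := by
        rw [PySem.Dict.contains_eq_decide_mem_keys]
        simp only [PySem.Dict.keys, decide_eq_false_iff_not]
        intro hmem
        exact hnotin (pv_innerB_sub ms e pm.1 hmem)
      unfold pvUpdVal
      rcases hl : pm.2.lookup e with _ | v
      · rw [hinn, hl]; simp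
      · by_cases hv : v > 0
        · rw [hqe]
          simp only [hv, decide_true, Bool.and_self, if_true]
          apply PySem.Dict.ext
          rw [PySem.Dict.items_insert_of_not_contains _ _ hnc]
          rw [hinn, hl]
          simp [hv]
        · rw [hinn, hl]
          simp [hv]
    -- value on new keys
    have hnewv : ∀ p ∈ pm.2, pvQual p.1 = true → p.1 ∉ pvKeysB ms →
        pvNewVal pm.1 p = PySem.Dict.mk (pvInnerB (ms ++ [pm]) p.1) := by
      intro p hp hqp hnp
      have h0 : pvInnerB ms p.1 = [] := pv_innerB_nil ms p.1 hqp hnp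
      have hl : pm.2.lookup p.1 = some p.2 := pv_lookup_eq_some pm.2 p.1 p.2 hndpm hp
      have hinn : pvInnerB (ms ++ [pm]) p.1 = if p.2 > 0 then [(pm.1, p.2)] else [] := by
        unfold pvInnerB
        rw [List.filterMap_append]
        unfold pvInnerB at h0
        rw [h0]
        by_cases hv : p.2 > 0 <;> simp [hl, hv]
      rw [hinn]
      by_cases hv : p.2 > 0
      · simp [pvNewVal, hv]
      · simp [pvNewVal, hv, PySem.Dict.empty]
    -- assemble
    show _ = (pvTarget (ms ++ [pm])).items
    simp only [pvTarget, hkeys, List.map_append, List.map_map]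
    congr 1
    · apply List.map_congr_left
      intro e he
      simp only [Function.comp]
      rw [hold e he]
    · -- new part
      have hsc : ∀ e, PySem.Set.contains (pvKeysB ms) e = decide (e ∈ pvKeysB ms) := by
        intro e
        by_cases h : e ∈ pvKeysB ms
        · simp [h, (PySem.Set.contains_iff _ _).mpr h]
        · simp only [h, decide_false]
          rw [← Bool.not_eq_true]
          exact fun hc => h ((PySem.Set.contains_iff _ _).mp hc)
      have hrw : ((pm.2.map Prod.fst).filter pvQual).filter
            (fun e => !PySem.Set.contains (pvKeysB ms) e)
          = (pm.2.filter (fun p => pvQual p.1 && !(pvTarget ms).contains p.1)).map Prod.fst := by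
        rw [List.filter_filter, List.filter_map]
        congr 1
        apply List.filter_congr
        intro p _
        simp [Function.comp, hsc, hct, Bool.and_comm]
      rw [hrw, List.map_map]
      apply List.map_congr_left
      intro p hp
      have hmem := List.mem_filter.mp hp
      have hcond := hmem.2
      rw [Bool.and_eq_true] at hcond
      have hqp : pvQual p.1 = true := hcond.1
      have hnp : p.1 ∉ pvKeysB ms := by
        have h2 := hcond.2
        rw [Bool.not_eq_eq_eq_not, Bool.not_true] at h2
        have h3 : (pvTarget ms).contains p.1 = false := h2
        rw [hct, decide_eq_false_iff_not] at h3
        exact h3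
      simp only [Function.comp]
      rw [hnewv p hmem.1 hqp hnp]

-- ===== VERDICT (by name: the statement is the Claim_ definition above) =====
theorem get_effects_spec : Claim_equal_get_effects := by
  intro monsters _ hpre
  unfold Spec_get_effects get_effects get_effects_alt
  rw [pv_main monsters hpre]
  unfold pvTarget
  simp
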